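-- pv_equiv track=rewrite | github.com/Vangie8412/code | seek_wrongSample.py | get_wrong_dapei
-- ===== SOURCE A (Python) =====
-- def get_wrong_dapei(cells=[],one=[],other=[]):
-- 	wrong_dapei=[]
-- 	for i in one:
-- 		for j in other:
-- 			if (i in cells)&(j in cells):
-- 				strvalue=i+'<>'+j
-- 				wrong_dapei.append(strvalue)
-- 	wrong_dapei=list(set(wrong_dapei))
-- 	return wrong_dapei
-- ===== SOURCE B (Python) =====
-- def get_wrong_dapei(cells=[],one=[],other=[]):
-- 	# B: pre-filter each side against a hash set of cells, then pair without per-pair membership tests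
-- 	present = set(cells)
-- 	good_one = {i for i in one if i in present}
-- 	good_other = {j for j in other if j in present}
-- 	pairs = set()
-- 	for a in good_one:
-- 		for b in good_other:
-- 			pairs.add(a + '<>' + b)
-- 	return list(pairs)
-- ===== Notes on version B (the rewrite author's own statement) =====
-- stated objective: faster
-- what changed: B filters one and other once against a hash set of cells into two deduplicated sets, then forms the cross-product strings over those small sets with no membership test inside the pairing loop, instead of A's nested scan that does two linear list-membership scans per pair and dedups only at the end.
import Mathlib
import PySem

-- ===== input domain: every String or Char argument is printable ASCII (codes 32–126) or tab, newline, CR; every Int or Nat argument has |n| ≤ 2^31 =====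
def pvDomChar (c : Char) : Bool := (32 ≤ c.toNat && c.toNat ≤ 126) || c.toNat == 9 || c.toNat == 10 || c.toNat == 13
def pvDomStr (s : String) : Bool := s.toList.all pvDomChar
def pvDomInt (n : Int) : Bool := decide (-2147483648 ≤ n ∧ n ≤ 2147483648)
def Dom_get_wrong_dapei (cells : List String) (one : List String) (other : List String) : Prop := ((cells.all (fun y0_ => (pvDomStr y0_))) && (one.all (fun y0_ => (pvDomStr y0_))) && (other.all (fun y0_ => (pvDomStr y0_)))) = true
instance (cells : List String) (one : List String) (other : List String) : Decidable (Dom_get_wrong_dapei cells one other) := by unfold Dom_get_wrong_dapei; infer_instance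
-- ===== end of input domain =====

-- B replaces A's nested scan with per-pair list-membership tests by two pre-filtered sets and a
-- membership-free pairing loop (objective: faster).

-- ===== PORT A =====
def get_wrong_dapei (cells : List String) (one : List String) (other : List String) : List String :=
  let wrong_dapei : List String :=
    one.foldl (fun acc i =>
      other.foldl (fun acc j =>
        if cells.contains i && cells.contains j then acc ++ [i ++ "<>" ++ j] else acc) acc) []
  PySem.Set.ofList wrong_dapei

-- ===== PORT B =====
def get_wrong_dapei_alt (cells : List String) (one : List String) (other : List String) : List String :=
  let present : PySem.Set String := PySem.Set.ofList cells
  let good_one : PySem.Set String := PySem.Set.ofList (one.filter (fun i => present.contains i))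
  let good_other : PySem.Set String := PySem.Set.ofList (other.filter (fun j => present.contains j))
  good_one.foldl (fun pairs a =>
    good_other.foldl (fun pairs b => PySem.Set.add pairs (a ++ "<>" ++ b)) pairs) PySem.Set.empty

-- ===== PRECONDITION & SPEC =====
def Spec_get_wrong_dapei (cells : List String) (one : List String) (other : List String) (out : List String) : Prop := out = get_wrong_dapei_alt cells one other
instance (cells : List String) (one : List String) (other : List String) (out : List String) : Decidable (Spec_get_wrong_dapei cells one other out) := by unfold Spec_get_wrong_dapei; infer_instance

-- ===== CLAIM (what is proved, stated in full; the proofs are below) =====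
def Claim_equal_get_wrong_dapei : Prop := ∀ (cells : List String) (one : List String) (other : List String), Dom_get_wrong_dapei cells one other → Spec_get_wrong_dapei cells one other (get_wrong_dapei cells one other)

-- ===== LEMMAS AND PROOFS =====

-- folding Set.add appends exactly the new first occurrences
theorem pv_foldl_add_eq {α : Type} [BEq α] [LawfulBEq α] (l : List α) (s : List α) :
    l.foldl PySem.Set.add s = s ++ (PySem.Set.ofList l).filter (fun y => !(s.contains y)) := by
  induction l generalizing s with
  | nil => simp [PySem.Set.ofList]
  | cons x l ih =>
    have consl : PySem.Set.ofList (x :: l) = x :: (PySem.Set.ofList l).filter (fun y => !(y == x)) := by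
      have h1 : PySem.Set.ofList (x :: l) = l.foldl PySem.Set.add [x] := rfl
      rw [h1, ih [x], List.singleton_append]
      congr 1
      apply List.filter_congr
      intro y _
      simp only [List.contains_eq_mem, List.mem_cons, List.not_mem_nil, or_false]
      by_cases hyx : y = x <;> simp [hyx]
    rw [List.foldl_cons, ih, consl]
    by_cases hxs : x ∈ s
    · have hadd : PySem.Set.add s x = s := by simp [PySem.Set.add, hxs]
      rw [hadd]
      have hcons : List.filter (fun y => !(s.contains y)) (x :: (PySem.Set.ofList l).filter (fun y => !(y == x)))
          = List.filter (fun y => !(s.contains y)) ((PySem.Set.ofList l).filter (fun y => !(y == x))) := by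
        simp [hxs]
      rw [hcons, List.filter_filter]
      congr 1
      apply List.filter_congr
      intro y _
      by_cases hyx : y = x
      · subst hyx; simp [hxs]
      · simp [hyx]
    · have hadd : PySem.Set.add s x = s ++ [x] := by simp [PySem.Set.add, hxs]
      rw [hadd]
      have hcons : List.filter (fun y => !(s.contains y)) (x :: (PySem.Set.ofList l).filter (fun y => !(y == x)))
          = x :: List.filter (fun y => !(s.contains y)) ((PySem.Set.ofList l).filter (fun y => !(y == x))) := by
        simp [hxs]
      rw [hcons, List.append_assoc, List.filter_filter, List.singleton_append]
      congr 2
      apply List.filter_congr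
      intro y _
      simp only [List.contains_append]
      by_cases hyx : y = x
      · subst hyx; simp
      · simp only [List.contains_eq_mem, List.mem_cons, List.not_mem_nil, or_false]
        simp [hyx, Bool.and_comm]

-- membership facts about folding Set.add
theorem pv_mem_foldl_add {α : Type} [BEq α] [LawfulBEq α] (l s : List α) (y : α)
    (h : y ∈ s ∨ y ∈ l) : y ∈ l.foldl PySem.Set.add s := by
  rw [pv_foldl_add_eq]
  rcases h with h | h
  · exact List.mem_append_left _ h
  · by_cases hs : y ∈ s
    · exact List.mem_append_left _ hs
    · refine List.mem_append_right _ ?_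
      refine List.mem_filter.2 ⟨(PySem.Set.mem_ofList l y).2 h, ?_⟩
      simpa using fun hc => hs (List.mem_of_elem_eq_true hc)

-- folding Set.add over elements already present is the identity
theorem pv_foldl_add_absorb {α : Type} [BEq α] [LawfulBEq α] (l s : List α)
    (h : ∀ y ∈ l, y ∈ s) : l.foldl PySem.Set.add s = s := by
  rw [pv_foldl_add_eq]
  have hnil : (PySem.Set.ofList l).filter (fun y => !(s.contains y)) = [] :=
    List.filter_eq_nil_iff.2 (fun y hy => by
      have hys := h y ((PySem.Set.mem_ofList l y).1 hy)
      simp [List.contains_eq_mem, hys])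
  rw [hnil, List.append_nil]

-- the fold of Set.add depends on the source list only through its dedup
theorem pv_foldl_add_congr {α : Type} [BEq α] [LawfulBEq α] (l₁ l₂ s : List α)
    (h : PySem.Set.ofList l₁ = PySem.Set.ofList l₂) :
    l₁.foldl PySem.Set.add s = l₂.foldl PySem.Set.add s := by
  rw [pv_foldl_add_eq, pv_foldl_add_eq, h]

-- deduplicating the outer list before flat-mapping does not change the accumulated set
theorem pv_foldl_add_flatMap_dedup {α β : Type} [BEq α] [LawfulBEq α] [BEq β] [LawfulBEq β]
    (h : α → List β) (xs : List α) (s : List β) :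
    (xs.flatMap h).foldl PySem.Set.add s = ((PySem.Set.ofList xs).flatMap h).foldl PySem.Set.add s := by
  induction xs generalizing s with
  | nil => rfl
  | cons x xs ih =>
    have consl : PySem.Set.ofList (x :: xs) = x :: (PySem.Set.ofList xs).filter (fun y => !(y == x)) := by
      have h1 : PySem.Set.ofList (x :: xs) = xs.foldl PySem.Set.add [x] := rfl
      rw [h1, pv_foldl_add_eq, List.singleton_append]
      congr 1
      apply List.filter_congr
      intro y _
      simp only [List.contains_eq_mem, List.mem_cons, List.not_mem_nil, or_false]
      by_cases hyx : y = x <;> simp [hyx]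
    rw [List.flatMap_cons, List.foldl_append, ih, consl, List.flatMap_cons, List.foldl_append]
    set t := (h x).foldl PySem.Set.add s with ht
    have htmem : ∀ y ∈ h x, y ∈ t := fun y hy => pv_mem_foldl_add _ _ _ (Or.inr hy)
    set m := PySem.Set.ofList xs with hm
    have hnd : m.Nodup := PySem.Set.nodup_ofList xs
    by_cases hxm : x ∈ m
    · obtain ⟨m₁, m₂, hsplit⟩ := List.append_of_mem hxm
      have hnd' : (m₁ ++ x :: m₂).Nodup := hsplit ▸ hnd
      have hx1 : x ∉ m₁ := fun hx1 => (List.disjoint_of_nodup_append hnd') hx1 (by simp)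
      have hx2 : x ∉ m₂ := (List.nodup_cons.1 (List.nodup_append.1 hnd').2.1).1
      have hfilt : (m₁ ++ x :: m₂).filter (fun y => !(y == x)) = m₁ ++ m₂ := by
        rw [List.filter_append, List.filter_cons]
        have e1 : m₁.filter (fun y => !(y == x)) = m₁ :=
          List.filter_eq_self.2 (fun y hy => by simp; rintro rfl; exact hx1 hy)
        have e2 : m₂.filter (fun y => !(y == x)) = m₂ :=
          List.filter_eq_self.2 (fun y hy => by simp; rintro rfl; exact hx2 hy)
        simp [e1, e2]
      rw [hsplit, hfilt, List.flatMap_append, List.flatMap_append, List.flatMap_cons,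
        List.foldl_append, List.foldl_append, List.foldl_append]
      have habs : (h x).foldl PySem.Set.add ((m₁.flatMap h).foldl PySem.Set.add t)
          = (m₁.flatMap h).foldl PySem.Set.add t :=
        pv_foldl_add_absorb _ _ (fun y hy => pv_mem_foldl_add _ _ _ (Or.inl (htmem y hy)))
      rw [habs]
    · have : m.filter (fun y => !(y == x)) = m :=
        List.filter_eq_self.2 (fun y hy => by simp; rintro rfl; exact hxm hy)
      rw [this]

-- changing each block to one with the same dedup does not change the accumulated set
theorem pv_foldl_add_flatMap_blocks {α β : Type} [BEq β] [LawfulBEq β]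
    (zs : List α) (h h' : α → List β) (s : List β)
    (hb : ∀ a ∈ zs, PySem.Set.ofList (h a) = PySem.Set.ofList (h' a)) :
    (zs.flatMap h).foldl PySem.Set.add s = (zs.flatMap h').foldl PySem.Set.add s := by
  induction zs generalizing s with
  | nil => rfl
  | cons z zs ih =>
    rw [List.flatMap_cons, List.flatMap_cons, List.foldl_append, List.foldl_append,
      pv_foldl_add_congr _ _ _ (hb z (by simp)), ih]
    intro a ha
    exact hb a (by simp [ha])

-- a flatMap with an if-filter inside is a flatMap over the filtered list
theorem pv_flatMap_if {α β : Type} (p : α → Bool) (h : α → List β) (l : List α) :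
    (l.flatMap fun a => if p a then h a else []) = (l.filter p).flatMap h := by
  induction l with
  | nil => rfl
  | cons x l ih =>
    by_cases hx : p x
    · simp [List.flatMap_cons, hx, ih]
    · simp [List.flatMap_cons, hx, ih]

theorem pv_contains_ofList {α : Type} [BEq α] [LawfulBEq α] (l : List α) (y : α) :
    (PySem.Set.ofList l).contains y = l.contains y := by
  by_cases h : y ∈ l
  · have h1 : y ∈ PySem.Set.ofList l := (PySem.Set.mem_ofList l y).2 h
    simp [List.contains_eq_mem, h, h1]
  · have h1 : y ∉ PySem.Set.ofList l := fun hc => h ((PySem.Set.mem_ofList l y).1 hc)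
    simp [List.contains_eq_mem, h, h1]

theorem pv_map_eq_flatMap {α β : Type} (f : α → β) (l : List α) :
    l.map f = l.flatMap fun a => [f a] := by
  induction l with
  | nil => rfl
  | cons x l ih => simp [List.flatMap_cons, ih]

-- dedup of a map is unchanged by first deduplicating the source
theorem pv_ofList_map_dedup {α β : Type} [BEq α] [LawfulBEq α] [BEq β] [LawfulBEq β]
    (f : α → β) (l : List α) :
    PySem.Set.ofList (l.map f) = PySem.Set.ofList ((PySem.Set.ofList l).map f) := by
  have h1 : l.map f = l.flatMap fun a => [f a] := pv_map_eq_flatMap f l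
  have h2 : (PySem.Set.ofList l).map f = (PySem.Set.ofList l).flatMap fun a => [f a] :=
    pv_map_eq_flatMap f (PySem.Set.ofList l)
  calc PySem.Set.ofList (l.map f)
      = (l.flatMap fun a => [f a]).foldl PySem.Set.add [] := by rw [PySem.Set.ofList_eq_foldl, h1]
    _ = ((PySem.Set.ofList l).flatMap fun a => [f a]).foldl PySem.Set.add [] :=
        pv_foldl_add_flatMap_dedup (fun a => [f a]) l []
    _ = PySem.Set.ofList ((PySem.Set.ofList l).map f) := by
        rw [h2, PySem.Set.ofList_eq_foldl ((PySem.Set.ofList l).flatMap fun a => [f a])]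

-- A's loop produces the unfiltered cross-product stream; B's loops fold Set.add over the pre-deduplicated one
theorem pv_A_norm (cells one other : List String) :
    get_wrong_dapei cells one other
      = PySem.Set.ofList (((one.filter (fun i => cells.contains i)).flatMap
          (fun i => (other.filter (fun j => cells.contains j)).map (fun j => i ++ "<>" ++ j)))) := by
  show PySem.Set.ofList _ = _
  congr 1
  have hfun : ∀ (acc : List String), ∀ i ∈ one,
      other.foldl (fun acc j => if cells.contains i && cells.contains j then acc ++ [i ++ "<>" ++ j] else acc) acc
        = acc ++ (if cells.contains i then
            (other.filter (fun j => cells.contains j)).map (fun j => i ++ "<>" ++ j) else []) := by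
    intro acc i _
    by_cases hi : cells.contains i
    · simp only [hi, Bool.true_and]
      exact PySem.List.foldl_append_if (fun j => cells.contains j) (fun j => i ++ "<>" ++ j) other acc
    · have hi' : cells.contains i = false := by simpa using hi
      simp only [hi', Bool.false_and, Bool.false_eq_true, if_false, List.foldl_fixed, List.append_nil]
  rw [PySem.List.foldl_congr_mem one _ _ [] hfun,
    PySem.List.foldl_append_eq_flatMap _ one [], List.nil_append,
    pv_flatMap_if (fun i => cells.contains i)]

theorem pv_B_norm (cells one other : List String) :
    get_wrong_dapei_alt cells one other
      = (((PySem.Set.ofList (one.filter (fun i => cells.contains i))).flatMap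
          (fun i => (PySem.Set.ofList (other.filter (fun j => cells.contains j))).map
            (fun j => i ++ "<>" ++ j)))).foldl PySem.Set.add [] := by
  show (PySem.Set.ofList (one.filter (fun i => (PySem.Set.ofList cells).contains i))).foldl
      (fun pairs a => (PySem.Set.ofList (other.filter (fun j => (PySem.Set.ofList cells).contains j))).foldl
        (fun pairs b => PySem.Set.add pairs (a ++ "<>" ++ b)) pairs) PySem.Set.empty = _
  have hfil : ∀ (l : List String), l.filter (fun i => (PySem.Set.ofList cells).contains i)
      = l.filter (fun i => cells.contains i) :=
    fun l => List.filter_congr (fun y _ => pv_contains_ofList cells y)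
  rw [hfil, hfil]
  have hinner : (PySem.Set.ofList (one.filter (fun i => cells.contains i))).foldl
      (fun pairs a => (PySem.Set.ofList (other.filter (fun j => cells.contains j))).foldl
        (fun pairs b => PySem.Set.add pairs (a ++ "<>" ++ b)) pairs) PySem.Set.empty
    = (PySem.Set.ofList (one.filter (fun i => cells.contains i))).foldl
      (fun pairs a => (((PySem.Set.ofList (other.filter (fun j => cells.contains j))).map
        (fun j => a ++ "<>" ++ j)).foldl PySem.Set.add pairs)) PySem.Set.empty :=
    PySem.List.foldl_congr_mem _ _ _ _ (fun acc a _ => (List.foldl_map).symm)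
  rw [hinner, ← List.foldl_flatMap]
  rfl

-- ===== VERDICT (by name: the statement is the Claim_ definition above) =====
theorem get_wrong_dapei_spec : Claim_equal_get_wrong_dapei := by
  intro cells one other _
  show _ = get_wrong_dapei_alt cells one other
  rw [pv_A_norm, pv_B_norm]
  rw [PySem.Set.ofList_eq_foldl]
  rw [pv_foldl_add_flatMap_dedup]
  exact pv_foldl_add_flatMap_blocks _ _ _ _
    (fun a _ => pv_ofList_map_dedup (fun j => a ++ "<>" ++ j) (other.filter (fun j => cells.contains j)))
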